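-- pv_equiv track=rewrite | github.com/curtiscali/project-euler | 40/soln40.py | nth_digit
-- ===== SOURCE A (Python) =====
-- def num_digits(n):
--     digit_count = 0
--     while n > 0:
--         digit_count += 1
--         n //= 10
--     return digit_count
--
-- def nth_digit(n, digit_num):
--     curr_digit = num_digits(n)
--
--     digit = n % 10
--     n //= 10
--     curr_digit -= 1
--
--     while n > 0 and curr_digit > digit_num:
--         digit = n % 10
--         curr_digit -= 1
--         n //= 10
--
--     return digit
-- ===== SOURCE B (Python) =====
-- def num_digits(n):
--     digit_count = 0
--     while n > 0:
--         digit_count += 1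
--         n //= 10
--     return digit_count
--
-- def nth_digit(n, digit_num):
--     d = num_digits(n)
--     if d == 0:
--         return n % 10
--     idx = max(0, min(digit_num, d - 1))
--     return n // 10 ** (d - 1 - idx) % 10
-- ===== Notes on version B (the rewrite author's own statement) =====
-- stated objective: simpler
-- what changed: B replaces A's right-to-left digit-peeling while-loop with a single closed-form extraction n // 10**(d-1-idx) % 10 after computing the digit count and clamping the index.
import Mathlib
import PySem

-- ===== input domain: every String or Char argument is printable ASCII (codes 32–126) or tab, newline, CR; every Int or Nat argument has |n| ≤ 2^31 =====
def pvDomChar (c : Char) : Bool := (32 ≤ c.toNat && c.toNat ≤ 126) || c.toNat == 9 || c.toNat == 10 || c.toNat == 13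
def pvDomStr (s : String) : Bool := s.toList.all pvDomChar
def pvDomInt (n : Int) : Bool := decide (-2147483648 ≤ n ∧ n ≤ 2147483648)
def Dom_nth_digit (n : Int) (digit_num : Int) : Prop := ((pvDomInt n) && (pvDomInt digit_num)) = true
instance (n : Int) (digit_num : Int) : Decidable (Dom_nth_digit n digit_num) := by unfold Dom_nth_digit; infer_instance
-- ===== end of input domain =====

-- B replaces A's right-to-left digit-peeling loop with one closed-form extraction
-- n // 10**(d-1-idx) % 10 after clamping the index; objective: simpler.

-- ===== PORT A =====
-- A's helper num_digits: while n > 0: digit_count += 1; n //= 10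
def numDigitsLoop (n acc : Int) : Int :=
  if 0 < n then numDigitsLoop (PySem.Int.floordiv n 10) (acc + 1) else acc
termination_by n.toNat
decreasing_by
  rw [PySem.Int.floordiv_eq_ediv_of_pos (by norm_num : (0:Int) < 10)]
  omega

-- A's while loop: while n > 0 and curr_digit > digit_num: digit = n % 10; curr_digit -= 1; n //= 10
def digitLoop (n curr_digit digit_num digit : Int) : Int :=
  if 0 < n ∧ digit_num < curr_digit then
    digitLoop (PySem.Int.floordiv n 10) (curr_digit - 1) digit_num (PySem.Int.mod n 10)
  else digit
termination_by n.toNat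
decreasing_by
  rw [PySem.Int.floordiv_eq_ediv_of_pos (by norm_num : (0:Int) < 10)]
  omega

def nth_digit (n : Int) (digit_num : Int) : Int :=
  let curr_digit := numDigitsLoop n 0
  digitLoop (PySem.Int.floordiv n 10) (curr_digit - 1) digit_num (PySem.Int.mod n 10)

-- ===== PORT B =====
-- B's helper num_digits (same loop as in Source B)
def numDigitsLoopB (n acc : Int) : Int :=
  if 0 < n then numDigitsLoopB (PySem.Int.floordiv n 10) (acc + 1) else acc
termination_by n.toNat
decreasing_by
  rw [PySem.Int.floordiv_eq_ediv_of_pos (by norm_num : (0:Int) < 10)]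
  omega

def nth_digit_alt (n : Int) (digit_num : Int) : Int :=
  let d := numDigitsLoopB n 0
  if d = 0 then PySem.Int.mod n 10
  else
    let idx := max 0 (min digit_num (d - 1))
    PySem.Int.mod (PySem.Int.floordiv n ((10 : Int) ^ (d - 1 - idx).toNat)) 10

-- ===== PRECONDITION & SPEC =====
def Spec_nth_digit (n : Int) (digit_num : Int) (out : Int) : Prop := out = nth_digit_alt n digit_num
instance (n : Int) (digit_num : Int) (out : Int) : Decidable (Spec_nth_digit n digit_num out) := by unfold Spec_nth_digit; infer_instance

-- ===== CLAIM (what is proved, stated in full; the proofs are below) =====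
def Claim_equal_nth_digit : Prop := ∀ (n : Int) (digit_num : Int), Dom_nth_digit n digit_num → Spec_nth_digit n digit_num (nth_digit n digit_num)

-- ===== LEMMAS AND PROOFS =====

lemma floordiv10 (n : Int) : PySem.Int.floordiv n 10 = n / 10 :=
  PySem.Int.floordiv_eq_ediv_of_pos (by norm_num)

lemma floordivPow (n : Int) (e : Nat) : PySem.Int.floordiv n ((10:Int) ^ e) = n / 10 ^ e :=
  PySem.Int.floordiv_eq_ediv_of_pos (by positivity)

lemma numDigitsB_eq (n acc : Int) : numDigitsLoopB n acc = numDigitsLoop n acc := by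
  rw [numDigitsLoopB, numDigitsLoop]
  simp only [floordiv10]
  split
  · exact numDigitsB_eq (n / 10) (acc + 1)
  · rfl
termination_by n.toNat
decreasing_by omega

lemma numDigits_acc (n acc : Int) : numDigitsLoop n acc = numDigitsLoop n 0 + acc := by
  by_cases h : 0 < n
  · rw [numDigitsLoop]
    conv_rhs => rw [numDigitsLoop]
    simp only [floordiv10, if_pos h]
    rw [numDigits_acc (n / 10) (acc + 1), numDigits_acc (n / 10) (0 + 1)]
    ring
  · rw [numDigitsLoop]
    conv_rhs => rw [numDigitsLoop]
    simp [h]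
termination_by n.toNat
decreasing_by all_goals omega

lemma numDigits_nonneg (n : Int) : 0 ≤ numDigitsLoop n 0 := by
  rw [numDigitsLoop]
  simp only [floordiv10]
  split
  · rw [numDigits_acc]
    have := numDigits_nonneg (n / 10)
    omega
  · omega
termination_by n.toNat
decreasing_by omega

lemma numDigits_step {n : Int} (h : 0 < n) :
    numDigitsLoop n 0 = numDigitsLoop (n / 10) 0 + 1 := by
  rw [numDigitsLoop]
  simp only [floordiv10, if_pos h]
  rw [numDigits_acc]
  omega

lemma numDigits_nonpos {n : Int} (h : ¬ 0 < n) : numDigitsLoop n 0 = 0 := by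
  rw [numDigitsLoop]; simp [h]

-- the closed-form characterisation of A's peeling loop
lemma loop_eq (k : Nat) : ∀ n digit_num : Int, n.toNat ≤ k → 0 < n →
    digitLoop (PySem.Int.floordiv n 10) (numDigitsLoop n 0 - 1) digit_num (PySem.Int.mod n 10)
      = PySem.Int.mod (PySem.Int.floordiv n
          ((10 : Int) ^ (numDigitsLoop n 0 - 1 - max 0 (min digit_num (numDigitsLoop n 0 - 1))).toNat)) 10 := by
  induction k with
  | zero => intro n _ hle hpos; omega
  | succ k ih =>
    intro n dn hle hpos
    have hd1 : numDigitsLoop n 0 = numDigitsLoop (n / 10) 0 + 1 := numDigits_step hpos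
    rw [digitLoop]
    simp only [floordiv10, floordivPow]
    by_cases hq : 0 < n / 10
    · have hdq : 1 ≤ numDigitsLoop (n / 10) 0 := by
        rw [numDigits_step hq]; have := numDigits_nonneg (n / 10 / 10); omega
      by_cases hc : dn < numDigitsLoop n 0 - 1
      · -- loop recurses
        rw [if_pos ⟨hq, hc⟩]
        have hm : (n / 10).toNat ≤ k := by omega
        have hih := ih (n / 10) dn hm hq
        simp only [floordiv10, floordivPow] at hih
        rw [show numDigitsLoop (n/10) 0 - 1 = numDigitsLoop n 0 - 1 - 1 by omega] at hih
        rw [hih]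
        -- align the clamps and fold the two divisions
        have hclamp : max 0 (min dn (numDigitsLoop n 0 - 1 - 1)) = max 0 (min dn (numDigitsLoop n 0 - 1)) := by
          omega
        rw [hclamp]
        set c := max 0 (min dn (numDigitsLoop n 0 - 1)) with hc'
        have hc0 : 0 ≤ c := le_max_left _ _
        have hcle : c ≤ numDigitsLoop n 0 - 1 - 1 := by omega
        have hexp : (numDigitsLoop n 0 - 1 - c).toNat = (numDigitsLoop n 0 - 1 - 1 - c).toNat + 1 := by omega
        rw [hexp, Int.ediv_ediv_of_nonneg (by norm_num : (0:Int) ≤ 10)]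
        congr 1
        rw [pow_succ]
        ring_nf
      · -- n//10 > 0 but curr_digit ≤ digit_num: loop exits with the last digit
        rw [if_neg (by tauto)]
        have h1 : max 0 (min dn (numDigitsLoop n 0 - 1)) = numDigitsLoop n 0 - 1 := by omega
        rw [h1]
        simp
    · -- n < 10: single digit remains
      rw [if_neg (by tauto)]
      have hd0 : numDigitsLoop (n / 10) 0 = 0 := numDigits_nonpos hq
      have h1 : max 0 (min dn (numDigitsLoop n 0 - 1)) = 0 := by omega
      rw [h1]
      have h2 : (numDigitsLoop n 0 - 1 - 0).toNat = 0 := by omega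
      rw [h2]
      simp

-- ===== VERDICT (by name: the statement is the Claim_ definition above) =====
theorem nth_digit_spec : Claim_equal_nth_digit := by
  intro n dn _
  unfold Spec_nth_digit nth_digit nth_digit_alt
  rw [numDigitsB_eq]
  by_cases hpos : 0 < n
  · have hd : numDigitsLoop n 0 ≠ 0 := by
      rw [numDigits_step hpos]; have := numDigits_nonneg (n / 10); omega
    rw [if_neg hd]
    exact loop_eq n.toNat n dn le_rfl hpos
  · have hd : numDigitsLoop n 0 = 0 := numDigits_nonpos hpos
    rw [hd, if_pos rfl]
    rw [digitLoop]
    rw [if_neg (by rw [floordiv10]; intro h; omega)]
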